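-- pv_equiv track=rewrite | github.com/Prat1510/Image-editor | pgm.py | averagingfilter
-- ===== SOURCE A (Python) =====
-- def pv(i,j,image):
-- 	if len(image)-1>i>0 and len(image[0])-1>j>0:
-- 		return int(round((image[i-1][j-1]+image[i-1][j]+image[i-1][j+1]+image[i][j- 1]+image[i][j]+image[i][j+1]+image[i+1][j-1]+ image[i+1][j]+image[i+1][j+1])/9))
-- 	else:
-- 		return image[i][j]
--
-- def averagingfilter(img):
-- 	col=len(img)
-- 	row=len(img[0])
-- 	M=[[0 for i in range(row)] for i in range(col)]
-- 	for i in range (0,col):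
-- 		for j in range (0,row):
-- 			M[i][j]=pv(i,j,img)
-- 	return M
-- ===== SOURCE B (Python) =====
-- def averagingfilter(img):
--     col = len(img)
--     row = len(img[0])
--     # summed-area table: P[i][j] = sum of img[p][q] for p<i, q<j (first `row` columns)
--     P = [[0] * (row + 1) for _ in range(col + 1)]
--     for i in range(col):
--         r = img[i]
--         for j in range(row):
--             P[i + 1][j + 1] = r[j] + P[i][j + 1] + P[i + 1][j] - P[i][j]
--     M = []
--     for i in range(col):
--         out = []
--         for j in range(row):
--             if 0 < i < col - 1 and 0 < j < row - 1:
--                 s = P[i + 2][j + 2] - P[i - 1][j + 2] - P[i + 2][j - 1] + P[i - 1][j - 1]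
--                 out.append((2 * s + 9) // 18)  # round-to-nearest of s/9 (never a tie since 9 is odd)
--             else:
--                 out.append(img[i][j])
--         M.append(out)
--     return M
-- ===== Notes on version B (the rewrite author's own statement) =====
-- stated objective: alternative
-- what changed: Replaces the per-pixel 9-neighbour gather with a summed-area (integral) table built in one pass; each interior pixel's exact 3x3 sum comes from four table lookups, rounded once with exact integer arithmetic (2*s+9)//18 instead of float round(s/9).
import Mathlib
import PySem

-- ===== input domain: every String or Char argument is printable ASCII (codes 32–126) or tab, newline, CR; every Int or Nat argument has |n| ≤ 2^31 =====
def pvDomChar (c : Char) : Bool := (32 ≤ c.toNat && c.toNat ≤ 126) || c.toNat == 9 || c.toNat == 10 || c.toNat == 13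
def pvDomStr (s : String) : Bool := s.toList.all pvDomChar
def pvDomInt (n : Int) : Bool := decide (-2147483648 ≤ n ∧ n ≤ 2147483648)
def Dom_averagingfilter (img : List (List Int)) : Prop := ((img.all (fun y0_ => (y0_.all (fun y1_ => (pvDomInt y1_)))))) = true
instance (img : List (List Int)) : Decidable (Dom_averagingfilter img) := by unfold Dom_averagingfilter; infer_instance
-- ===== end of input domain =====

-- B replaces the per-pixel 9-neighbour gather with a one-pass summed-area table and four lookups
-- per interior pixel, rounding the exact integer 3x3 sum once (alternative decomposition, same cost class).

-- ===== PORT A =====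

-- image[i][j] for in-range Nat indices (both Pythons only index with indices that are in range under Pre_).
def pvGet (image : List (List Int)) (i j : Nat) : Int := (image.getD i []).getD j 0

-- int(round(s/9)): exact on the stated domain (|s| ≤ 9*2^31): s/9 is never within the float
-- representation error of a half-integer (9 is odd), so Python's float round-to-nearest-even
-- equals the nearest integer, which is ⌊(2s+9)/18⌋ (Python floor division).
def pvRound9 (s : Int) : Int := PySem.Int.floordiv (2 * s + 9) 18

def pvA (i j : Nat) (image : List (List Int)) : Int :=
  if i + 1 < image.length ∧ 0 < i ∧ j + 1 < image.headI.length ∧ 0 < j then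
    pvRound9 (pvGet image (i-1) (j-1) + pvGet image (i-1) j + pvGet image (i-1) (j+1)
      + pvGet image i (j-1) + pvGet image i j + pvGet image i (j+1)
      + pvGet image (i+1) (j-1) + pvGet image (i+1) j + pvGet image (i+1) (j+1))
  else pvGet image i j

def averagingfilter (img : List (List Int)) : List (List Int) :=
  (List.range img.length).map (fun i =>
    (List.range img.headI.length).map (fun j => pvA i j img))

-- ===== PORT B =====

-- inner loop of the prefix-table row build: P[i+1][j+1] = r[j] + P[i][j+1] + P[i+1][j] - P[i][j];
-- walks the previous row (p0 = P[i][j], p1 = P[i][j+1]) carrying c = P[i+1][j].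
def pvNextRowGo : List Int → Int → List Int → List Int
  | p0 :: p1 :: ps, c, x :: xs => (x + p1 + c - p0) :: pvNextRowGo (p1 :: ps) (x + p1 + c - p0) xs
  | _, _, _ => []

def pvNextRow (prev r : List Int) : List Int := 0 :: pvNextRowGo prev 0 r

-- P = [[0]*(row+1)] then one new prefix row per image row.
def pvBuildP : List Int → List (List Int) → List (List Int)
  | prev, [] => [prev]
  | prev, r :: rs => prev :: pvBuildP (pvNextRow prev r) rs

def averagingfilter_alt (img : List (List Int)) : List (List Int) :=
  let col := img.length
  let row := img.headI.length
  let P := pvBuildP (List.replicate (row + 1) 0) img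
  (List.range col).map (fun i =>
    (List.range row).map (fun j =>
      if 0 < i ∧ i < col - 1 ∧ 0 < j ∧ j < row - 1 then
        pvRound9 (pvGet P (i+2) (j+2) - pvGet P (i-1) (j+2) - pvGet P (i+2) (j-1) + pvGet P (i-1) (j-1))
      else pvGet img i j))

-- ===== PRECONDITION & SPEC =====
-- A raises IndexError when img is empty (len(img[0])) or when some row is shorter than row 0
-- (pv then indexes past a short row); Pre_ admits exactly the inputs where A returns.
def Pre_averagingfilter (img : List (List Int)) : Prop :=
  img ≠ [] ∧ ∀ r ∈ img, img.headI.length ≤ r.length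
instance (img : List (List Int)) : Decidable (Pre_averagingfilter img) := by
  unfold Pre_averagingfilter; infer_instance

def pvWitness_averagingfilter : List (List Int) := [[1,2,3],[4,5,6],[7,8,9]]

def Spec_averagingfilter (img : List (List Int)) (out : List (List Int)) : Prop := out = averagingfilter_alt img
instance (img : List (List Int)) (out : List (List Int)) : Decidable (Spec_averagingfilter img out) := by unfold Spec_averagingfilter; infer_instance

-- ===== CLAIM (what is proved, stated in full; the proofs are below) =====
def Claim_equal_averagingfilter : Prop := ∀ (img : List (List Int)), Dom_averagingfilter img → Pre_averagingfilter img → Spec_averagingfilter img (averagingfilter img)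

-- ===== LEMMAS AND PROOFS =====

-- row prefix sum: T img p b = sum of pixel row p over columns < b
def pvT (img : List (List Int)) (p b : Nat) : Int := ∑ q ∈ Finset.range b, pvGet img p q
-- rectangle sum: R img a b = sum over rows < a, columns < b
def pvR (img : List (List Int)) (a b : Nat) : Int := ∑ p ∈ Finset.range a, pvT img p b

theorem pvNextRowGo_getD (xs : List Int) : ∀ (ps : List Int) (p0 c : Int) (k : Nat),
    k < ps.length → k < xs.length →
    (pvNextRowGo (p0 :: ps) c xs).getD k 0
      = ps.getD k 0 + (c - p0) + ∑ q ∈ Finset.range (k+1), xs.getD q 0 := by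
  induction xs with
  | nil => intro ps p0 c k _ h; simp at h
  | cons x xs ih =>
    intro ps p0 c k hk hx
    cases ps with
    | nil => simp at hk
    | cons p1 ps =>
      cases k with
      | zero =>
        simp only [pvNextRowGo, List.getD_cons_zero]
        rw [Finset.sum_range_one]
        simp only [List.getD_cons_zero]
        ring
      | succ k =>
        have h1 : k < ps.length := by simpa using hk
        have h2 : k < xs.length := by simpa using hx
        have := ih ps p1 (x + p1 + c - p0) k h1 h2
        simp only [pvNextRowGo, List.getD_cons_succ]
        rw [this, Finset.sum_range_succ' (fun q => (x :: xs).getD q 0) (k+1)]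
        simp only [List.getD_cons_succ, List.getD_cons_zero]
        ring

theorem pvNextRowGo_length : ∀ (ps : List Int) (p0 c : Int) (xs : List Int),
    (pvNextRowGo (p0 :: ps) c xs).length = min ps.length xs.length := by
  intro ps p0 c xs
  induction xs generalizing ps p0 c with
  | nil => simp [pvNextRowGo]
  | cons x xs ih =>
    cases ps with
    | nil => simp [pvNextRowGo]
    | cons p1 ps => simp [pvNextRowGo, ih]

theorem pvNextRow_spec (n : Nat) (prev r : List Int)
    (hl : prev.length = n + 1) (h0 : prev.getD 0 0 = 0) (hr : n ≤ r.length) :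
    (pvNextRow prev r).length = n + 1 ∧ (pvNextRow prev r).getD 0 0 = 0 ∧
    ∀ b ≤ n, (pvNextRow prev r).getD b 0 = prev.getD b 0 + ∑ q ∈ Finset.range b, r.getD q 0 := by
  cases prev with
  | nil => simp at hl
  | cons p0 ps =>
    have hps : ps.length = n := by simpa using hl
    refine ⟨by simp [pvNextRow, pvNextRowGo_length, hps]; omega, by simp [pvNextRow], ?_⟩
    intro b hb
    cases b with
    | zero =>
      have hp0 : p0 = 0 := by simpa using h0
      simp [pvNextRow, hp0]
    | succ k =>
      have hk1 : k < ps.length := by omega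
      have hk2 : k < r.length := by omega
      have := pvNextRowGo_getD r ps p0 0 k hk1 hk2
      simp only [pvNextRow, List.getD_cons_succ]
      rw [this]
      have hp0 : p0 = 0 := by simpa using h0
      simp [hp0]

theorem pvBuildP_spec (n : Nat) : ∀ (rows : List (List Int)) (prev : List Int) (a b : Nat),
    prev.length = n + 1 → prev.getD 0 0 = 0 → (∀ r ∈ rows, n ≤ r.length) →
    a ≤ rows.length → b ≤ n →
    pvGet (pvBuildP prev rows) a b
      = prev.getD b 0 + ∑ p ∈ Finset.range a, ∑ q ∈ Finset.range b, pvGet rows p q := by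
  intro rows
  induction rows with
  | nil =>
    intro prev a b _ _ _ ha _
    have : a = 0 := by simpa using ha
    subst this
    simp [pvBuildP, pvGet]
  | cons r rs ih =>
    intro prev a b hl h0 hr ha hb
    cases a with
    | zero => simp [pvBuildP, pvGet]
    | succ a =>
      obtain ⟨hl', h0', hrow⟩ := pvNextRow_spec n prev r hl h0 (hr r (by simp))
      have hrs : ∀ x ∈ rs, n ≤ x.length := fun x hx => hr x (by simp [hx])
      have ha' : a ≤ rs.length := by simpa using ha
      have := ih (pvNextRow prev r) a b hl' h0' hrs ha' hb
      simp only [pvBuildP]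
      have hget : pvGet (prev :: pvBuildP (pvNextRow prev r) rs) (a+1) b
          = pvGet (pvBuildP (pvNextRow prev r) rs) a b := by simp [pvGet]
      rw [hget, this, hrow b hb,
        Finset.sum_range_succ' (fun p => ∑ q ∈ Finset.range b, pvGet (r :: rs) p q) a]
      have hc : ∀ p, pvGet (r :: rs) (p+1) = pvGet rs p := by intro p; funext q; simp [pvGet]
      simp only [hc]
      have : ∑ q ∈ Finset.range b, pvGet (r :: rs) 0 q = ∑ q ∈ Finset.range b, r.getD q 0 := by
        apply Finset.sum_congr rfl; intro q _; simp [pvGet]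
      rw [this]; ring

theorem pvP_eq (img : List (List Int)) (hpre : Pre_averagingfilter img) (a b : Nat)
    (ha : a ≤ img.length) (hb : b ≤ img.headI.length) :
    pvGet (pvBuildP (List.replicate (img.headI.length + 1) 0) img) a b = pvR img a b := by
  have := pvBuildP_spec img.headI.length img (List.replicate (img.headI.length + 1) 0) a b
    (by simp) (by simp) (fun r hr => hpre.2 r hr) ha hb
  rw [this]
  simp [pvR, pvT]

theorem pvRsub (img : List (List Int)) (k b : Nat) :
    pvR img (k+3) b - pvR img k b = pvT img k b + pvT img (k+1) b + pvT img (k+2) b := by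
  simp [pvR, Finset.sum_range_succ]; ring

theorem pvTsub (img : List (List Int)) (p l : Nat) :
    pvT img p (l+3) - pvT img p l = pvGet img p l + pvGet img p (l+1) + pvGet img p (l+2) := by
  simp [pvT, Finset.sum_range_succ]; ring

theorem pv_pointwise (img : List (List Int)) (hpre : Pre_averagingfilter img)
    (i j : Nat) (hi : i < img.length) (hj : j < img.headI.length) :
    (if 0 < i ∧ i < img.length - 1 ∧ 0 < j ∧ j < img.headI.length - 1 then
        pvRound9 (pvGet (pvBuildP (List.replicate (img.headI.length + 1) 0) img) (i+2) (j+2)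
          - pvGet (pvBuildP (List.replicate (img.headI.length + 1) 0) img) (i-1) (j+2)
          - pvGet (pvBuildP (List.replicate (img.headI.length + 1) 0) img) (i+2) (j-1)
          + pvGet (pvBuildP (List.replicate (img.headI.length + 1) 0) img) (i-1) (j-1))
      else pvGet img i j) = pvA i j img := by
  unfold pvA
  by_cases h : i + 1 < img.length ∧ 0 < i ∧ j + 1 < img.headI.length ∧ 0 < j
  · rw [if_pos h, if_pos (by omega)]
    obtain ⟨hi1, hi0, hj1, hj0⟩ := h
    obtain ⟨k, rfl⟩ : ∃ k, i = k + 1 := ⟨i - 1, by omega⟩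
    obtain ⟨l, rfl⟩ : ∃ l, j = l + 1 := ⟨j - 1, by omega⟩
    simp only [Nat.add_sub_cancel]
    rw [show k + 1 + 2 = k + 3 from rfl, show l + 1 + 2 = l + 3 from rfl,
      pvP_eq img hpre (k+3) (l+3) (by omega) (by omega),
      pvP_eq img hpre k (l+3) (by omega) (by omega),
      pvP_eq img hpre (k+3) l (by omega) (by omega),
      pvP_eq img hpre k l (by omega) (by omega)]
    congr 1
    have h1 := pvRsub img k (l+3)
    have h2 := pvRsub img k l
    have h3 := pvTsub img k l
    have h4 := pvTsub img (k+1) l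
    have h5 := pvTsub img (k+2) l
    linarith
  · rw [if_neg h, if_neg (by omega)]

-- ===== VERDICT (by name: the statement is the Claim_ definition above) =====
theorem averagingfilter_spec : Claim_equal_averagingfilter := by
  intro img _ hpre
  unfold Spec_averagingfilter averagingfilter averagingfilter_alt
  apply List.map_congr_left
  intro i hi
  apply List.map_congr_left
  intro j hj
  exact (pv_pointwise img hpre i j (List.mem_range.mp hi) (List.mem_range.mp hj)).symm
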